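-- pv_equiv track=rewrite | github.com/jpdotcom/Hackerrank-solutions | max_heap.py | create_heap
-- ===== SOURCE A (Python) =====
-- def swap(parent_node,heap,element_node,total_swaps):
--
--
--     if heap[element_node]>heap[parent_node]:
--         total_swaps+=1
--         prev_node=heap[parent_node]
--         heap[parent_node]=heap[element_node]
--         heap[element_node]=prev_node
--         return swap(int((parent_node-1)/2),heap,parent_node,total_swaps)
--     return total_swaps,heap
--
-- def create_heap(arr):
--     total_swaps=0
--     heap=[]
--     for i in range(len(arr)):
--         heap.append(arr[i])
--         operation=swap(int((i-1)/2),heap,i,total_swaps)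
--         heap=operation[1]
--         total_swaps=operation[0]
--
--
--
--     return total_swaps
-- ===== SOURCE B (Python) =====
-- def create_heap(arr):
--     total_swaps = 0
--     heap = []
--     for i, x in enumerate(arr):
--         heap.append(x)
--         node = i
--         while node > 0:
--             parent = (node - 1) // 2
--             if heap[node] > heap[parent]:
--                 heap[node], heap[parent] = heap[parent], heap[node]
--                 total_swaps += 1
--                 node = parent
--             else:
--                 break
--     return total_swaps
-- ===== Notes on version B (the rewrite author's own statement) =====
-- stated objective: simpler
-- what changed: Replaces A's recursive swap helper (which rebuilds and returns the whole heap and swap count each call) with an in-place iterative sift-up loop inside the insertion loop; same comparisons and swaps, no recursion and no tuple plumbing.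
import Mathlib
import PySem

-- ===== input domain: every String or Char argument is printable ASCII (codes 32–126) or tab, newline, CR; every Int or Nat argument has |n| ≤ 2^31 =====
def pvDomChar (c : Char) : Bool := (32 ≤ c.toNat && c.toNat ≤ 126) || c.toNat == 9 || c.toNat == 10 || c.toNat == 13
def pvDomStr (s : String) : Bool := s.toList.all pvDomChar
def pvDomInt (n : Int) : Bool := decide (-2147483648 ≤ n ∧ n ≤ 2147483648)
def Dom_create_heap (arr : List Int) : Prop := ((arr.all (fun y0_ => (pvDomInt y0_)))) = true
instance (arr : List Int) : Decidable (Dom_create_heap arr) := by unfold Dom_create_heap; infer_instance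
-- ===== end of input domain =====

-- B replaces A's recursive, heap-returning swap helper with an in-place iterative sift-up loop (simpler decomposition, same cost).

-- ===== PORT A =====
-- A's recursive `swap`; `fuel` only makes the recursion structural (create_heap
-- calls it with fuel i+1, more than the depth of any parent chain from index i).
def swapA : Nat → Int → List Int → Int → Int → Int × List Int
  | 0, _, heap, _, ts => (ts, heap)
  | fuel+1, parent, heap, elem, ts =>
    if PySem.List.pyGetD heap elem 0 > PySem.List.pyGetD heap parent 0 then
      -- total_swaps += 1; prev = heap[parent]; heap[parent] = heap[elem]; heap[elem] = prev
      let prev := PySem.List.pyGetD heap parent 0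
      let heap' := (heap.set parent.toNat (PySem.List.pyGetD heap elem 0)).set elem.toNat prev
      swapA fuel (Int.tdiv (parent - 1) 2) heap' parent (ts + 1)
    else (ts, heap)

def create_heap (arr : List Int) : Int :=
  ((List.range arr.length).foldl (fun (st : Int × List Int) (i : Nat) =>
      let heap := st.2 ++ [PySem.List.pyGetD arr (i : Int) 0]
      swapA (i + 1) (Int.tdiv ((i : Int) - 1) 2) heap (i : Int) st.1) (0, [])).1

-- ===== PORT B =====
-- B's `while node > 0` sift-up loop.
def siftUpB (heap : List Int) (node : Nat) (ts : Int) : Int × List Int :=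
  if h : 0 < node then
    let parent := (node - 1) / 2
    if PySem.List.pyGetD heap (node : Int) 0 > PySem.List.pyGetD heap (parent : Int) 0 then
      siftUpB ((heap.set parent (PySem.List.pyGetD heap (node : Int) 0)).set node
        (PySem.List.pyGetD heap (parent : Int) 0)) parent (ts + 1)
    else (ts, heap)
  else (ts, heap)
termination_by node
decreasing_by omega

def create_heap_alt (arr : List Int) : Int :=
  ((PySem.List.enumerate arr 0).foldl (fun (st : Int × List Int) p =>
      siftUpB (st.2 ++ [p.2]) p.1.toNat st.1) (0, [])).1

-- ===== PRECONDITION & SPEC =====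
def Spec_create_heap (arr : List Int) (out : Int) : Prop := out = create_heap_alt arr
instance (arr : List Int) (out : Int) : Decidable (Spec_create_heap arr out) := by unfold Spec_create_heap; infer_instance

-- ===== CLAIM (what is proved, stated in full; the proofs are below) =====
def Claim_equal_create_heap : Prop := ∀ (arr : List Int), Dom_create_heap arr → Spec_create_heap arr (create_heap arr)

-- ===== LEMMAS AND PROOFS =====

theorem tdiv_cast (n : Nat) (h : 0 < n) : Int.tdiv ((n : Int) - 1) 2 = ((n - 1) / 2 : Nat) := by
  rw [Int.tdiv_eq_ediv_of_nonneg (by omega)]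
  omega

theorem swapA_eq_siftUpB (n : Nat) : ∀ (fuel : Nat) (heap : List Int) (ts : Int),
    n < fuel → swapA fuel (Int.tdiv ((n : Int) - 1) 2) heap (n : Int) ts = siftUpB heap n ts := by
  induction n using Nat.strong_induction_on with
  | _ n ih =>
    intro fuel heap ts hf
    obtain ⟨f, rfl⟩ : ∃ f, fuel = f + 1 := ⟨fuel - 1, by omega⟩
    rcases Nat.eq_zero_or_pos n with rfl | hn
    · rw [siftUpB]
      rw [show Int.tdiv (((0:Nat) : Int) - 1) 2 = ((0:Nat) : Int) from by decide]
      rw [swapA]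
      rw [if_neg (by omega), dif_neg (by omega)]
    · rw [tdiv_cast n hn, swapA, siftUpB, dif_pos hn]
      simp only [Int.toNat_natCast]
      split_ifs with hc
      · exact ih ((n-1)/2) (by omega) f _ (ts+1) (by omega)
      · rfl

theorem fold_eq (arr : List Int) :
    (List.range arr.length).foldl (fun (st : Int × List Int) (i : Nat) =>
      let heap := st.2 ++ [PySem.List.pyGetD arr (i : Int) 0]
      swapA (i + 1) (Int.tdiv ((i : Int) - 1) 2) heap (i : Int) st.1) (0, []) =
    (PySem.List.enumerate arr 0).foldl (fun (st : Int × List Int) p =>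
      siftUpB (st.2 ++ [p.2]) p.1.toNat st.1) (0, []) := by
  induction arr using List.reverseRecOn with
  | nil => rfl
  | append_singleton l x ih =>
    rw [List.length_append, List.length_singleton, List.range_succ, List.foldl_append,
        PySem.List.enumerate_append, List.foldl_append]
    have hcong : (List.range l.length).foldl (fun (st : Int × List Int) (i : Nat) =>
      let heap := st.2 ++ [PySem.List.pyGetD (l ++ [x]) (i : Int) 0]
      swapA (i + 1) (Int.tdiv ((i : Int) - 1) 2) heap (i : Int) st.1) (0, []) =
        (List.range l.length).foldl (fun (st : Int × List Int) (i : Nat) =>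
      let heap := st.2 ++ [PySem.List.pyGetD l (i : Int) 0]
      swapA (i + 1) (Int.tdiv ((i : Int) - 1) 2) heap (i : Int) st.1) (0, []) := by
      apply PySem.List.foldl_congr_mem
      intro acc i hi
      have hil : i < l.length := List.mem_range.mp hi
      simp only [PySem.List.pyGetD_natCast]
      rw [List.getD_append _ _ _ _ hil]
    rw [hcong]
    rw [ih]
    simp only [List.foldl_cons, List.foldl_nil, PySem.List.enumerate_nil,
      PySem.List.enumerate_cons]
    rw [show PySem.List.pyGetD (l ++ [x]) ((l.length : Nat) : Int) 0 = x from by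
      simp [PySem.List.pyGetD_natCast, List.getD_eq_getElem?_getD]]
    rw [swapA_eq_siftUpB l.length (l.length + 1) _ _ (by omega)]
    simp

-- ===== VERDICT (by name: the statement is the Claim_ definition above) =====
theorem create_heap_spec : Claim_equal_create_heap := by
  intro arr _
  unfold Spec_create_heap create_heap create_heap_alt
  rw [fold_eq]
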